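-- pv_equiv track=rewrite | github.com/averagejoematt/life-platform | lambdas/daily_insight_compute_lambda.py | _extract_intention_texts
-- ===== SOURCE A (Python) =====
-- def _extract_intention_texts(journal_entries):
--     """Pull intention texts from journal entries.
--
--     Returns dict: {"today": str|None, "tomorrow": str|None}
--       "today"    -- morning check-in todays_intention
--       "tomorrow" -- evening reflection tomorrow_focus
--     """
--     result = {"today": None, "tomorrow": None}
--     for entry in journal_entries:
--         ti = (entry.get("todays_intention") or "").strip()
--         if ti and len(ti) > 5 and not result["today"]:
--             result["today"] = ti
--
--         tf = (entry.get("tomorrow_focus") or "").strip()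
--         if tf and len(tf) > 5 and not result["tomorrow"]:
--             result["tomorrow"] = tf
--
--     return result
-- ===== SOURCE B (Python) =====
-- def _extract_intention_texts(journal_entries):
--     """Pull intention texts from journal entries (two independent first-match searches)."""
--     entries = list(journal_entries)
--
--     def first_valid(key):
--         return next((t for e in entries
--                      if (t := (e.get(key) or "").strip()) and len(t) > 5), None)
--
--     return {"today": first_valid("todays_intention"),
--             "tomorrow": first_valid("tomorrow_focus")}
-- ===== Notes on version B (the rewrite author's own statement) =====
-- stated objective: simpler
-- what changed: Replaces the single stateful fold with its 'not result[...]' guards by two independent first-match searches (next over a generator) per field, after materializing the iterable once.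
import Mathlib
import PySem

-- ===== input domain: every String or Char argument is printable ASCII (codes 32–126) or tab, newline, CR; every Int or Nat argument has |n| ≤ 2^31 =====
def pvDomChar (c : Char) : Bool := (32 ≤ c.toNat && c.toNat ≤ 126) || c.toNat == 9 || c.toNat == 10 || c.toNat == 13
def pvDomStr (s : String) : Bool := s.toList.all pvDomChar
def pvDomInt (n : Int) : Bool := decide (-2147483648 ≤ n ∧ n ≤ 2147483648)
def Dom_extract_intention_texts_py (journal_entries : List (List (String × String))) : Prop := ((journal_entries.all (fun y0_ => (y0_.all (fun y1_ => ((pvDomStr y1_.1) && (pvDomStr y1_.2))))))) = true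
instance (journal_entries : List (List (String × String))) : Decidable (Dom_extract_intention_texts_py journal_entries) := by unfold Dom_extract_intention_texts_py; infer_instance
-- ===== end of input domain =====

-- B replaces A's single stateful loop with two independent first-match searches; objective: simpler.

-- ===== PORT A =====
-- truthiness of result["today"] / result["tomorrow"]: None and "" are falsy
def pvTruthyStrOpt (o : Option String) : Bool :=
  match o with
  | none => false
  | some s => s ≠ ""

-- one iteration of A's loop body over the state (result["today"], result["tomorrow"])
def pvAStep (r : Option String × Option String) (entry : List (String × String)) :
    Option String × Option String :=
  let ti := PySem.Str.strip (((PySem.Dict.mk entry).get? "todays_intention").getD "")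
  let r1 := if ti ≠ "" ∧ PySem.Str.len ti > 5 ∧ ¬ (pvTruthyStrOpt r.1 = true)
            then (some ti, r.2) else r
  let tf := PySem.Str.strip (((PySem.Dict.mk entry).get? "tomorrow_focus").getD "")
  if tf ≠ "" ∧ PySem.Str.len tf > 5 ∧ ¬ (pvTruthyStrOpt r1.2 = true)
  then (r1.1, some tf) else r1

def extract_intention_texts_py (journal_entries : List (List (String × String))) :
    List (String × Option String) :=
  let r := journal_entries.foldl pvAStep (none, none)
  [("today", r.1), ("tomorrow", r.2)]

-- ===== PORT B =====
-- first_valid(key): loop with early return = findSome?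
def pvFirstValid (entries : List (List (String × String))) (key : String) : Option String :=
  entries.findSome? (fun e =>
    let t := PySem.Str.strip (((PySem.Dict.mk e).get? key).getD "")
    if t ≠ "" ∧ PySem.Str.len t > 5 then some t else none)

def extract_intention_texts_py_alt (journal_entries : List (List (String × String))) :
    List (String × Option String) :=
  [("today", pvFirstValid journal_entries "todays_intention"),
   ("tomorrow", pvFirstValid journal_entries "tomorrow_focus")]

-- ===== PRECONDITION & SPEC =====
def Spec_extract_intention_texts_py (journal_entries : List (List (String × String))) (out : List (String × Option String)) : Prop := out = extract_intention_texts_py_alt journal_entries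
instance (journal_entries : List (List (String × String))) (out : List (String × Option String)) : Decidable (Spec_extract_intention_texts_py journal_entries out) := by unfold Spec_extract_intention_texts_py; infer_instance

-- ===== CLAIM (what is proved, stated in full; the proofs are below) =====
def Claim_equal_extract_intention_texts_py : Prop := ∀ (journal_entries : List (List (String × String))), Dom_extract_intention_texts_py journal_entries → Spec_extract_intention_texts_py journal_entries (extract_intention_texts_py journal_entries)

-- ===== LEMMAS AND PROOFS =====

-- how a first-match result r refines an accumulator component o of A's fold
def pvStep (o r : Option String) : Option String :=
  if pvTruthyStrOpt o then o else
    match r with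
    | some v => some v
    | none => o

theorem pvAStep_eq (t tm : Option String) (e : List (String × String)) :
    pvAStep (t, tm) e =
      (if PySem.Str.strip (((PySem.Dict.mk e).get? "todays_intention").getD "") ≠ "" ∧
          PySem.Str.len (PySem.Str.strip (((PySem.Dict.mk e).get? "todays_intention").getD "")) > 5 ∧
          ¬ (pvTruthyStrOpt t = true)
       then some (PySem.Str.strip (((PySem.Dict.mk e).get? "todays_intention").getD "")) else t,
       if PySem.Str.strip (((PySem.Dict.mk e).get? "tomorrow_focus").getD "") ≠ "" ∧
          PySem.Str.len (PySem.Str.strip (((PySem.Dict.mk e).get? "tomorrow_focus").getD "")) > 5 ∧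
          ¬ (pvTruthyStrOpt tm = true)
       then some (PySem.Str.strip (((PySem.Dict.mk e).get? "tomorrow_focus").getD "")) else tm) := by
  simp only [pvAStep]
  split_ifs <;> simp_all

theorem pvFirstValid_cons (e : List (String × String)) (es : List (List (String × String)))
    (k : String) :
    pvFirstValid (e :: es) k =
      (if PySem.Str.strip (((PySem.Dict.mk e).get? k).getD "") ≠ "" ∧
          PySem.Str.len (PySem.Str.strip (((PySem.Dict.mk e).get? k).getD "")) > 5
       then some (PySem.Str.strip (((PySem.Dict.mk e).get? k).getD ""))
       else pvFirstValid es k) := by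
  simp only [pvFirstValid, List.findSome?_cons]
  by_cases hv : PySem.Str.strip (((PySem.Dict.mk e).get? k).getD "") ≠ "" ∧
      PySem.Str.len (PySem.Str.strip (((PySem.Dict.mk e).get? k).getD "")) > 5
  · rw [if_pos hv, if_pos hv]
  · rw [if_neg hv, if_neg hv]

theorem pvStep_if (t rest : Option String) (x : String) :
    pvStep t (if x ≠ "" ∧ PySem.Str.len x > 5 then some x else rest)
      = pvStep (if x ≠ "" ∧ PySem.Str.len x > 5 ∧ ¬ (pvTruthyStrOpt t = true) then some x else t)
          rest := by
  by_cases hv : x ≠ "" ∧ PySem.Str.len x > 5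
  · by_cases ht : pvTruthyStrOpt t = true
    · rw [if_pos hv, if_neg (show ¬ (x ≠ "" ∧ PySem.Str.len x > 5 ∧ ¬ (pvTruthyStrOpt t = true)) by tauto)]
      simp [pvStep, ht]
    · rw [if_pos hv, if_pos ⟨hv.1, hv.2, ht⟩]
      simp only [pvStep]
      rw [if_neg ht, if_pos (by simp [pvTruthyStrOpt, hv.1])]
  · have h2 : ¬ (x ≠ "" ∧ PySem.Str.len x > 5 ∧ ¬ (pvTruthyStrOpt t = true)) := by tauto
    rw [if_neg hv, if_neg h2]

theorem pvFold_eq (es : List (List (String × String))) :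
    ∀ t tm : Option String,
      es.foldl pvAStep (t, tm) =
        (pvStep t (pvFirstValid es "todays_intention"),
         pvStep tm (pvFirstValid es "tomorrow_focus")) := by
  induction es with
  | nil =>
      intro t tm
      simp [pvFirstValid, pvStep]
  | cons e es ih =>
      intro t tm
      rw [List.foldl_cons, pvAStep_eq, ih, pvFirstValid_cons, pvFirstValid_cons, Prod.mk.injEq]
      exact ⟨(pvStep_if t (pvFirstValid es "todays_intention") _).symm,
             (pvStep_if tm (pvFirstValid es "tomorrow_focus") _).symm⟩

-- ===== VERDICT (by name: the statement is the Claim_ definition above) =====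
theorem extract_intention_texts_py_spec : Claim_equal_extract_intention_texts_py := by
  intro js _
  unfold Spec_extract_intention_texts_py extract_intention_texts_py extract_intention_texts_py_alt
  rw [pvFold_eq js none none]
  simp only [pvStep, pvTruthyStrOpt]
  cases pvFirstValid js "todays_intention" <;> cases pvFirstValid js "tomorrow_focus" <;> simp
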